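-- pv_equiv track=rewrite | github.com/damaradiprabowo/flight-combo-api | api/routes/find_combinations.py | optimize_combination
-- ===== SOURCE A (Python) =====
-- def optimize_combination(combo, all_flights, target):
--     combo_sum = sum(duration for _, duration in combo)
--     combo_set = set(iata for iata, _ in combo)
--
--     available_flights = [(iata, duration) for iata, duration in all_flights if iata not in combo_set]
--
--     best_combo = combo
--     best_diff = target - combo_sum
--
--     for i, (iata, duration) in enumerate(combo):
--         for new_iata, new_duration in available_flights:
--             new_combo = combo[:i] + [(new_iata, new_duration)] + combo[i+1:]
--             new_sum = sum(duration for _, duration in new_combo)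
--             if new_sum <= target:
--                 new_diff = target - new_sum
--                 if new_diff < best_diff:
--                     best_combo = new_combo
--                     best_diff = new_diff
--                     if best_diff == 0:
--                         return best_combo
--
--     return best_combo
-- ===== SOURCE B (Python) =====
-- def optimize_combination(combo, all_flights, target):
--     total = sum(d for _, d in combo)
--     taken = set(iata for iata, _ in combo)
--     # one pass: for each distinct duration, the first usable flight having it
--     first_by_dur = {}
--     for f in all_flights:
--         if f[0] not in taken and f[1] not in first_by_dur:
--             first_by_dur[f[1]] = f
--     # distinct candidate durations, longest first, each paired with its first flight
--     ranked = sorted(first_by_dur.items(), key=lambda p: p[0], reverse=True)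
--     best = None
--     best_diff = target - total
--     for i, (_, d) in enumerate(combo):
--         bound = target - total + d  # a replacement at slot i must last at most this
--         for dur, f in ranked:
--             if dur <= bound:        # first fit = longest feasible duration for slot i
--                 if bound - dur < best_diff:
--                     best = (i, f)
--                     best_diff = bound - dur
--                 break
--     if best is None:
--         return combo
--     i, f = best
--     return combo[:i] + [f] + combo[i + 1:]
-- ===== Notes on version B (the rewrite author's own statement) =====
-- stated objective: faster
-- what changed: B replaces A's scan of every (slot, candidate) pair with list splicing and re-summing by a precomputed index: one pass groups the usable flights into a first-flight-per-distinct-duration dict, its items are sorted by duration descending once, and each slot then takes the first feasible entry of that ranked list (its longest feasible duration) and splices only once at the end.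
import Mathlib
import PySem

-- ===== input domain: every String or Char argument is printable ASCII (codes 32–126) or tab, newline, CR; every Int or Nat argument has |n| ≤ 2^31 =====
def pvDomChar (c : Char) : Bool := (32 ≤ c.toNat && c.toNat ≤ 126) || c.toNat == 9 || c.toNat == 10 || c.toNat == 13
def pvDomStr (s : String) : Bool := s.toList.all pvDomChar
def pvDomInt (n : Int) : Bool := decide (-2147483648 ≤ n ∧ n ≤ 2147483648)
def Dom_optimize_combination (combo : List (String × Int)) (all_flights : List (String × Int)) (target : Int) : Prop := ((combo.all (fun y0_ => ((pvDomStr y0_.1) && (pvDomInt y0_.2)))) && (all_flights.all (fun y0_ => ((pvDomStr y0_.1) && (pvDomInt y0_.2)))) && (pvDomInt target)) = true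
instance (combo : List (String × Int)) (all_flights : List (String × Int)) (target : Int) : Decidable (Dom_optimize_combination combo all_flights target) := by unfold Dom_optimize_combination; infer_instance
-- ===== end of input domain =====

-- B drops A's scan over every (slot, candidate) pair with per-trial splicing and re-summing:
-- it groups the usable flights into a first-flight-per-distinct-duration dict, sorts those
-- durations descending once, lets each slot take the first feasible entry of that ranked
-- list, and splices only once at the end (objective: faster).

-- ===== PORT A =====
-- inner 'for new_iata, new_duration in available_flights' loop; .inr = the early 'return best_combo'
def pvA_inner (combo : List (String × Int)) (target : Int) (i : Int) :
    List (String × Int) → (List (String × Int) × Int) → ((List (String × Int) × Int) ⊕ List (String × Int))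
  | [], st => .inl st
  | f :: rest, (best_combo, best_diff) =>
    let new_combo := PySem.List.slice combo none (some i) ++ [f] ++ PySem.List.slice combo (some (i + 1)) none
    let new_sum := (new_combo.map (·.2)).sum
    if new_sum ≤ target then
      let new_diff := target - new_sum
      if new_diff < best_diff then
        if new_diff = 0 then .inr new_combo
        else pvA_inner combo target i rest (new_combo, new_diff)
      else pvA_inner combo target i rest (best_combo, best_diff)
    else pvA_inner combo target i rest (best_combo, best_diff)

-- outer 'for i, (iata, duration) in enumerate(combo)' loop
def pvA_outer (combo avail : List (String × Int)) (target : Int) :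
    List (Int × (String × Int)) → (List (String × Int) × Int) → List (String × Int)
  | [], st => st.1
  | (i, _) :: rest, st =>
    match pvA_inner combo target i avail st with
    | .inr r => r
    | .inl st' => pvA_outer combo avail target rest st'

def optimize_combination (combo : List (String × Int)) (all_flights : List (String × Int)) (target : Int) : List (String × Int) :=
  let combo_sum := (combo.map (·.2)).sum
  let combo_set : PySem.Set String := PySem.Set.ofList (combo.map (·.1))
  let available_flights := all_flights.filter (fun f => !(PySem.Set.contains combo_set f.1))
  pvA_outer combo available_flights target (PySem.List.enumerate combo 0) (combo, target - combo_sum)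

-- ===== PORT B =====
-- 'if best is None: return combo' else 'combo[:i] + [f] + combo[i+1:]'
def pvB_build (combo : List (String × Int)) : Option (Int × (String × Int)) → List (String × Int)
  | none => combo
  | some (i, f) => PySem.List.slice combo none (some i) ++ [f] ++ PySem.List.slice combo (some (i + 1)) none

-- inner 'for dur, f in ranked' loop: stop at the first feasible duration, update if it improves
def pvB_scan (bound bd : Int) (i : Int) (bo : Option (Int × (String × Int))) :
    List (Int × (String × Int)) → Int × Option (Int × (String × Int))
  | [] => (bd, bo)
  | (dur, f) :: rest =>
    if dur ≤ bound then
      if bound - dur < bd then (bound - dur, some (i, f)) else (bd, bo)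
    else pvB_scan bound bd i bo rest

def optimize_combination_alt (combo : List (String × Int)) (all_flights : List (String × Int)) (target : Int) : List (String × Int) :=
  let total := (combo.map (·.2)).sum
  let taken : PySem.Set String := PySem.Set.ofList (combo.map (·.1))
  let first_by_dur := all_flights.foldl
    (fun d f => if !(PySem.Set.contains taken f.1) && !(PySem.Dict.contains d f.2) then d.insert f.2 f else d)
    PySem.Dict.empty
  let ranked := PySem.List.sorted first_by_dur.items (fun p => p.1) true
  let st := (PySem.List.enumerate combo 0).foldl
    (fun st ip => pvB_scan (target - total + ip.2.2) st.1 ip.1 st.2 ranked)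
    (target - total, none)
  pvB_build combo st.2

-- ===== PRECONDITION & SPEC =====
def Spec_optimize_combination (combo : List (String × Int)) (all_flights : List (String × Int)) (target : Int) (out : List (String × Int)) : Prop := out = optimize_combination_alt combo all_flights target
instance (combo : List (String × Int)) (all_flights : List (String × Int)) (target : Int) (out : List (String × Int)) : Decidable (Spec_optimize_combination combo all_flights target out) := by unfold Spec_optimize_combination; infer_instance

-- ===== CLAIM (what is proved, stated in full; the proofs are below) =====
def Claim_equal_optimize_combination : Prop := ∀ (combo : List (String × Int)) (all_flights : List (String × Int)) (target : Int), Dom_optimize_combination combo all_flights target → Spec_optimize_combination combo all_flights target (optimize_combination combo all_flights target)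

-- ===== LEMMAS AND PROOFS =====

-- proof-level middle form of A's search: the same loops with the incremental sum
-- combo_sum - old + new; Bool = the early 'return' fired (new_diff == 0)
def pvI_inner (target i base : Int) :
    List (String × Int) → (Int × Option (Int × (String × Int))) → ((Int × Option (Int × (String × Int))) × Bool)
  | [], st => (st, false)
  | f :: rest, (bd, bo) =>
    let nd := target - (base + f.2)
    if 0 ≤ nd ∧ nd < bd then
      if nd = 0 then ((nd, some (i, f)), true)
      else pvI_inner target i base rest (nd, some (i, f))
    else pvI_inner target i base rest (bd, bo)

def pvI_outer (avail : List (String × Int)) (target total : Int) :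
    List (Int × (String × Int)) → (Int × Option (Int × (String × Int))) → (Int × Option (Int × (String × Int)))
  | [], st => st
  | (i, p) :: rest, st =>
    let st' := (pvI_inner target i (total - p.2) avail st).1
    if st'.1 = 0 then st' else pvI_outer avail target total rest st'

-- splice sum: durations of combo[:k] + [f] + combo[k+1:] sum to combo_sum - combo[k].2 + f.2
lemma pv_sum_splice (combo : List (String × Int)) (k : Nat) (hk : k < combo.length) (f : String × Int) :
    (((combo.take k ++ [f] ++ combo.drop (k + 1)).map (·.2)).sum : Int)
      = (combo.map (·.2)).sum - combo[k].2 + f.2 := by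
  have h1 : (combo.map (·.2)).sum
      = ((combo.take k).map (·.2)).sum + combo[k].2 + ((combo.drop (k + 1)).map (·.2)).sum := by
    conv_lhs => rw [show combo = combo.take k ++ combo[k] :: combo.drop (k + 1) by
      conv_lhs => rw [← List.take_append_drop k combo]
      rw [List.drop_eq_getElem_cons hk]]
    simp only [List.map_append, List.map_cons, List.sum_append, List.sum_cons]
    ring
  simp only [List.map_append, List.map_cons, List.map_nil, List.sum_append, List.sum_cons,
    List.sum_nil, h1]
  ring

-- the slice expressions with a natural index are take/drop
lemma pv_slice_to (combo : List (String × Int)) (k : Nat) :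
    PySem.List.slice combo none (some (k : Int)) = combo.take k :=
  PySem.List.slice_to_natCast ..

lemma pv_slice_from (combo : List (String × Int)) (k : Nat) :
    PySem.List.slice combo (some ((k : Int) + 1)) none = combo.drop (k + 1) := by
  rw [show ((k : Int) + 1) = ((k + 1 : Nat) : Int) by push_cast; ring, PySem.List.slice_from_natCast]

-- A's inner pass, stepped against the incremental inner pass
lemma pv_inner_equiv (combo : List (String × Int)) (target : Int) (k : Nat) (hk : k < combo.length) :
    ∀ (avail : List (String × Int)) (bd : Int) (bo : Option (Int × (String × Int))),
      pvA_inner combo target (k : Int) avail (pvB_build combo bo, bd)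
        = (match pvI_inner target (k : Int) ((combo.map (·.2)).sum - combo[k].2) avail (bd, bo) with
           | ((bd', bo'), false) => .inl (pvB_build combo bo', bd')
           | ((_, bo'), true) => .inr (pvB_build combo bo')) := by
  intro avail
  induction avail with
  | nil => intro bd bo; simp [pvA_inner, pvI_inner]
  | cons f rest ih =>
    intro bd bo
    have hs1 := pv_slice_to combo k
    have hs2 := pv_slice_from combo k
    have hsum := pv_sum_splice combo k hk f
    simp only [pvA_inner, pvI_inner, hs1, hs2, hsum]
    by_cases hc : 0 ≤ target - ((combo.map (·.2)).sum - combo[k].2 + f.2) ∧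
        target - ((combo.map (·.2)).sum - combo[k].2 + f.2) < bd
    · rw [if_pos (show 0 ≤ target - ((combo.map (·.2)).sum - combo[k].2 + f.2) ∧
          target - ((combo.map (·.2)).sum - combo[k].2 + f.2) < bd by omega),
        if_pos (by omega : (combo.map (·.2)).sum - combo[k].2 + f.2 ≤ target),
        if_pos hc.2]
      by_cases h0 : target - ((combo.map (·.2)).sum - combo[k].2 + f.2) = 0
      · rw [if_pos h0, if_pos h0]
        simp [pvB_build, hs1, hs2]
      · rw [if_neg h0, if_neg h0]
        have := ih (target - ((combo.map (·.2)).sum - combo[k].2 + f.2)) (some ((k : Int), f))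
        simpa [pvB_build, hs1, hs2] using this
    · rw [if_neg (show ¬ (0 ≤ target - ((combo.map (·.2)).sum - combo[k].2 + f.2) ∧
          target - ((combo.map (·.2)).sum - combo[k].2 + f.2) < bd) by omega)]
      by_cases h1 : (combo.map (·.2)).sum - combo[k].2 + f.2 ≤ target
      · rw [if_pos h1, if_neg (by omega : ¬ target - ((combo.map (·.2)).sum - combo[k].2 + f.2) < bd)]
        exact ih bd bo
      · rw [if_neg h1]
        exact ih bd bo

-- with a nonpositive best_diff A's loops never update
lemma pvA_inner_id (combo : List (String × Int)) (target i : Int) (avail : List (String × Int))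
    (bc : List (String × Int)) (bd : Int) (hbd : bd ≤ 0) :
    pvA_inner combo target i avail (bc, bd) = .inl (bc, bd) := by
  induction avail with
  | nil => simp [pvA_inner]
  | cons f rest ih =>
    simp only [pvA_inner]
    split_ifs with h1 h2 h3
    · omega
    · omega
    · exact ih
    · exact ih

lemma pvA_outer_id (combo avail : List (String × Int)) (target : Int) (l : List (Int × (String × Int)))
    (bc : List (String × Int)) (bd : Int) (hbd : bd ≤ 0) :
    pvA_outer combo avail target l (bc, bd) = bc := by
  induction l with
  | nil => simp [pvA_outer]
  | cons x rest ih =>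
    obtain ⟨i, p⟩ := x
    simp only [pvA_outer, pvA_inner_id combo target i avail bc bd hbd]
    exact ih

-- if the incremental inner pass broke out, its best_diff is 0
lemma pvI_inner_flag (target i base : Int) :
    ∀ (avail : List (String × Int)) (bd : Int) (bo : Option (Int × (String × Int))),
      (pvI_inner target i base avail (bd, bo)).2 = true → ((pvI_inner target i base avail (bd, bo)).1).1 = 0 := by
  intro avail
  induction avail with
  | nil => intro bd bo h; simp [pvI_inner] at h
  | cons f rest ih =>
    intro bd bo
    simp only [pvI_inner]
    split_ifs with h1 h2
    · intro _; simpa using h2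
    · exact ih _ _
    · exact ih _ _

-- A's whole search equals the incremental search followed by one final splice
lemma pv_outer_equiv (combo avail : List (String × Int)) (target : Int) :
    ∀ (l : List (Int × (String × Int))),
      (∀ x ∈ l, ∃ k : Nat, ∃ h : k < combo.length, x = ((k : Int), combo[k])) →
      ∀ (bd : Int) (bo : Option (Int × (String × Int))),
        pvA_outer combo avail target l (pvB_build combo bo, bd)
          = pvB_build combo (pvI_outer avail target ((combo.map (·.2)).sum) l (bd, bo)).2 := by
  intro l
  induction l with
  | nil => intro _ bd bo; simp [pvA_outer, pvI_outer]
  | cons x rest ih =>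
    intro hmem bd bo
    obtain ⟨k, hk, hx⟩ := hmem x (List.mem_cons_self ..)
    obtain ⟨i, p⟩ := x
    obtain ⟨hi, hp⟩ := Prod.mk.injEq .. ▸ hx
    subst hi hp
    simp only [pvA_outer, pvI_outer]
    rw [pv_inner_equiv combo target k hk avail bd bo]
    rcases hr : pvI_inner target (k : Int) ((combo.map (·.2)).sum - combo[k].2) avail (bd, bo) with ⟨⟨bd', bo'⟩, flag⟩
    cases flag with
    | true =>
      have h0 : bd' = 0 := by
        have := pvI_inner_flag target (k : Int) ((combo.map (·.2)).sum - combo[k].2) avail bd bo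
        rw [hr] at this; exact this rfl
      simp [h0]
    | false =>
      by_cases h0 : bd' = 0
      · simp only [h0, if_pos]
        exact pvA_outer_id combo avail target rest (pvB_build combo bo') 0 le_rfl
      · rw [if_neg h0]
        exact ih (fun x hx => hmem x (List.mem_cons_of_mem _ hx)) bd' bo'

-- first flight attaining the largest duration ≤ bound (spec of a row's best swap)
def pvBFc (f : String × Int) : Option (String × Int) → Option (String × Int)
  | some g => if f.2 < g.2 then some g else some f
  | none => some f

def pvBF (bound : Int) : List (String × Int) → Option (String × Int)
  | [] => none
  | f :: rest => if f.2 ≤ bound then pvBFc f (pvBF bound rest) else pvBF bound rest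

lemma pvBFc_none (f : String × Int) : pvBFc f none = some f := rfl

lemma pvBFc_some (f g : String × Int) : pvBFc f (some g) = if f.2 < g.2 then some g else some f := rfl

lemma pvBF_none (bound : Int) :
    ∀ (avail : List (String × Int)), pvBF bound avail = none → ∀ h ∈ avail, ¬ h.2 ≤ bound := by
  intro avail
  induction avail with
  | nil => simp
  | cons f rest ih =>
    intro hn h hmem
    simp only [pvBF] at hn
    split_ifs at hn with hf
    · rcases hg : pvBF bound rest with _ | g <;> rw [hg] at hn
      · rw [pvBFc_none] at hn; cases hn
      · rw [pvBFc_some] at hn; split_ifs at hn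
    · rcases List.mem_cons.1 hmem with h1 | h1
      · subst h1; exact hf
      · exact ih hn h h1

lemma pvBF_some (bound : Int) :
    ∀ (avail : List (String × Int)) (g : String × Int), pvBF bound avail = some g →
      g.2 ≤ bound ∧ (∀ h ∈ avail, h.2 ≤ bound → h.2 ≤ g.2) ∧
        avail.find? (fun h => h.2 == g.2) = some g := by
  intro avail
  induction avail with
  | nil => simp [pvBF]
  | cons f rest ih =>
    intro g hg
    simp only [pvBF] at hg
    split_ifs at hg with hf
    · rcases hr : pvBF bound rest with _ | g' <;> rw [hr] at hg
      · -- rest has no feasible element; g = f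
        rw [pvBFc_none] at hg
        obtain rfl : f = g := by simpa using hg
        refine ⟨hf, ?_, ?_⟩
        · intro h hmem hh
          rcases List.mem_cons.1 hmem with h1 | h1
          · exact h1 ▸ le_rfl
          · exact absurd hh (pvBF_none bound rest hr h h1)
        · simp [List.find?]
      · rw [pvBFc_some] at hg
        obtain ⟨hg'le, hg'max, hg'find⟩ := ih g' hr
        split_ifs at hg with hlt
        · obtain rfl : g' = g := by simpa using hg
          refine ⟨hg'le, ?_, ?_⟩
          · intro h hmem hh
            rcases List.mem_cons.1 hmem with h1 | h1
            · subst h1; omega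
            · exact hg'max h h1 hh
          · have hne : (f.2 == g'.2) = false := by simp; omega
            simp only [List.find?, hne]
            exact hg'find
        · obtain rfl : f = g := by simpa using hg
          refine ⟨hf, ?_, ?_⟩
          · intro h hmem hh
            rcases List.mem_cons.1 hmem with h1 | h1
            · exact h1 ▸ le_rfl
            · exact le_trans (hg'max h h1 hh) (by omega)
          · simp [List.find?]
    · obtain ⟨hle, hmax, hfind⟩ := ih g hg
      refine ⟨hle, ?_, ?_⟩
      · intro h hmem hh
        rcases List.mem_cons.1 hmem with h1 | h1
        · subst h1; omega
        · exact hmax h h1 hh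
      · have hne : (f.2 == g.2) = false := by simp; omega
        simp only [List.find?, hne]
        exact hfind

-- the incremental inner pass computes exactly the best feasible swap for its row
lemma pv_inner_bf (target i base bound : Int) (hb : target - base = bound) :
    ∀ (avail : List (String × Int)) (bd : Int) (bo : Option (Int × (String × Int))),
      pvI_inner target i base avail (bd, bo)
        = (pvBF bound avail).elim ((bd, bo), false)
            (fun g => if bound - g.2 < bd then
                ((bound - g.2, some (i, g)), decide (bound - g.2 = 0))
              else ((bd, bo), false)) := by
  subst hb
  intro avail
  induction avail with
  | nil => intro bd bo; simp [pvI_inner, pvBF]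
  | cons f rest ih =>
    intro bd bo
    simp only [pvI_inner, pvBF]
    by_cases hfeas : f.2 ≤ target - base
    · rw [if_pos hfeas]
      by_cases himp : target - (base + f.2) < bd
      · rw [if_pos (show 0 ≤ target - (base + f.2) ∧ target - (base + f.2) < bd by omega)]
        by_cases h0 : target - (base + f.2) = 0
        · rw [if_pos h0]
          rcases hr : pvBF (target - base) rest with _ | g'
          · simp only [pvBFc_none, Option.elim_some]
            rw [if_pos (show target - base - f.2 < bd by omega)]
            simp [show target - base - f.2 = 0 by omega, show target - (base + f.2) = target - base - f.2 by omega]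
          · obtain ⟨hle, _, _⟩ := pvBF_some (target - base) rest g' hr
            simp only [pvBFc_some]
            rw [if_neg (by omega : ¬ f.2 < g'.2)]
            simp only [Option.elim_some]
            rw [if_pos (show target - base - f.2 < bd by omega)]
            simp [show target - base - f.2 = 0 by omega, show target - (base + f.2) = target - base - f.2 by omega]
        · rw [if_neg h0, ih]
          rcases hr : pvBF (target - base) rest with _ | g'
          · simp only [pvBFc_none, Option.elim_none, Option.elim_some]
            rw [if_pos (show target - base - f.2 < bd by omega)]
            simp [show ¬ target - base - f.2 = 0 by omega, show target - (base + f.2) = target - base - f.2 by omega]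
          · simp only [pvBFc_some]
            by_cases hlt : f.2 < g'.2
            · rw [if_pos hlt]
              simp only [Option.elim_some]
              rw [if_pos (show target - base - g'.2 < target - (base + f.2) by omega),
                if_pos (show target - base - g'.2 < bd by omega)]
            · rw [if_neg hlt]
              simp only [Option.elim_some]
              rw [if_neg (show ¬ target - base - g'.2 < target - (base + f.2) by omega),
                if_pos (show target - base - f.2 < bd by omega)]
              simp [show ¬ target - base - f.2 = 0 by omega, show target - (base + f.2) = target - base - f.2 by omega]
      · rw [if_neg (show ¬ (0 ≤ target - (base + f.2) ∧ target - (base + f.2) < bd) by omega), ih]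
        rcases hr : pvBF (target - base) rest with _ | g'
        · simp only [pvBFc_none, Option.elim_none, Option.elim_some]
          rw [if_neg (show ¬ target - base - f.2 < bd by omega)]
        · obtain ⟨hle, _, _⟩ := pvBF_some (target - base) rest g' hr
          simp only [pvBFc_some]
          by_cases hlt : f.2 < g'.2
          · rw [if_pos hlt]
          · rw [if_neg hlt]
            simp only [Option.elim_some]
            rw [if_neg (show ¬ target - base - g'.2 < bd by omega),
              if_neg (show ¬ target - base - f.2 < bd by omega)]
    · rw [if_neg hfeas,
        if_neg (show ¬ (0 ≤ target - (base + f.2) ∧ target - (base + f.2) < bd) by omega), ih]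

-- B's first-fit scan on an infeasible ranked list does nothing
lemma pvB_scan_none (bound bd : Int) (i : Int) (bo : Option (Int × (String × Int))) :
    ∀ (l : List (Int × (String × Int))), (∀ p ∈ l, ¬ p.1 ≤ bound) →
      pvB_scan bound bd i bo l = (bd, bo) := by
  intro l
  induction l with
  | nil => simp [pvB_scan]
  | cons p rest ih =>
    intro hinf
    obtain ⟨dur, f⟩ := p
    simp only [pvB_scan]
    rw [if_neg (hinf (dur, f) (List.mem_cons_self ..))]
    exact ih (fun q hq => hinf q (List.mem_cons_of_mem _ hq))

-- on a strictly descending ranked list, the first fit is the maximal feasible entry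
lemma pvB_scan_best (bound bd : Int) (i : Int) (bo : Option (Int × (String × Int))) :
    ∀ (l : List (Int × (String × Int))) (d : Int) (f : String × Int),
      l.Pairwise (fun a b => b.1 < a.1) → (d, f) ∈ l → d ≤ bound →
      (∀ p ∈ l, p.1 ≤ bound → p.1 ≤ d) →
      pvB_scan bound bd i bo l = if bound - d < bd then (bound - d, some (i, f)) else (bd, bo) := by
  intro l
  induction l with
  | nil => simp
  | cons p rest ih =>
    intro d f hpw hmem hfeas hmax
    obtain ⟨d0, f0⟩ := p
    simp only [pvB_scan]
    by_cases h0 : d0 ≤ bound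
    · rw [if_pos h0]
      rcases List.mem_cons.1 hmem with h1 | h1
      · obtain ⟨hd, hf⟩ := Prod.mk.injEq .. ▸ h1
        subst hd; subst hf; rfl
      · exfalso
        have hlt := (List.pairwise_cons.1 hpw).1 (d, f) h1
        have hle2 := hmax (d0, f0) (List.mem_cons_self ..) h0
        simp only at hlt hle2
        omega
    · rw [if_neg h0]
      have hmem' : (d, f) ∈ rest := by
        rcases List.mem_cons.1 hmem with h1 | h1
        · exfalso; obtain ⟨h2, _⟩ := Prod.mk.injEq .. ▸ h1; omega
        · exact h1
      exact ih d f (List.pairwise_cons.1 hpw).2 hmem' hfeas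
        (fun q hq => hmax q (List.mem_cons_of_mem _ hq))

-- a scan started at best_diff 0 can never improve
lemma pvB_scan_id (bound : Int) (i : Int) (bo : Option (Int × (String × Int))) :
    ∀ (l : List (Int × (String × Int))), pvB_scan bound 0 i bo l = (0, bo) := by
  intro l
  induction l with
  | nil => simp [pvB_scan]
  | cons p rest ih =>
    obtain ⟨dur, f⟩ := p
    simp only [pvB_scan]
    split_ifs with h1 h2
    · omega
    · rfl
    · exact ih

-- the guarded dict-building loop: lookup is the first usable flight with that duration
lemma pv_dict_get (pred : (String × Int) → Bool) :
    ∀ (l : List (String × Int)) (d0 : PySem.Dict Int (String × Int)) (k : Int),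
      (l.foldl (fun d f => if pred f && !(PySem.Dict.contains d f.2) then d.insert f.2 f else d) d0).get? k
        = (d0.get? k).or (l.find? (fun f => pred f && f.2 == k)) := by
  intro l
  induction l with
  | nil => intro d0 k; simp
  | cons f rest ih =>
    intro d0 k
    simp only [List.foldl_cons, List.find?]
    by_cases hp : pred f = true
    · by_cases hc : d0.contains f.2 = true
      · rw [if_neg (by simp [hp, hc])]
        by_cases hk : f.2 = k
        · have : (pred f && f.2 == k) = true := by simp [hp, hk]
          rw [this, ih]
          obtain ⟨v, hv⟩ : ∃ v, d0.get? k = some v := by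
            have hcc := PySem.Dict.contains_eq_isSome_get? d0 f.2
            rw [hc] at hcc
            subst hk
            exact Option.isSome_iff_exists.1 hcc.symm
          simp [hv]
        · have : (pred f && f.2 == k) = false := by simp [hk]
          rw [this, ih]
      · rw [if_pos (by simp [hp, hc])]
        by_cases hk : f.2 = k
        · have : (pred f && f.2 == k) = true := by simp [hp, hk]
          rw [this, ih]
          have h0 : d0.get? k = none := by
            rw [PySem.Dict.get?_eq_none_iff_contains]; rw [← hk]
            simpa using hc
          have h1 : (d0.insert f.2 f).get? k = some f := by
            rw [PySem.Dict.get?_insert, if_pos hk.symm]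
          simp [h0, h1]
        · have : (pred f && f.2 == k) = false := by simp [hk]
          rw [this, ih]
          rw [PySem.Dict.get?_insert, if_neg (fun h => hk h.symm)]
    · rw [if_neg (by simp [hp]), ih]
      have : (pred f && f.2 == k) = false := by simp [hp]
      rw [this]

-- the built dict keeps its keys distinct
lemma pv_dict_nodup (pred : (String × Int) → Bool) :
    ∀ (l : List (String × Int)) (d0 : PySem.Dict Int (String × Int)), d0.keys.Nodup →
      (l.foldl (fun d f => if pred f && !(PySem.Dict.contains d f.2) then d.insert f.2 f else d) d0).keys.Nodup := by
  intro l
  induction l with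
  | nil => intro d0 h; simpa
  | cons f rest ih =>
    intro d0 h
    simp only [List.foldl_cons]
    split_ifs with hg
    · exact ih _ (PySem.Dict.nodup_keys_insert d0 f.2 f h)
    · exact ih _ h

-- find? over a filtered list
lemma pv_find?_filter {α : Type} (p q : α → Bool) :
    ∀ (l : List α), (l.filter p).find? q = l.find? (fun a => p a && q a) := by
  intro l
  induction l with
  | nil => simp
  | cons x rest ih =>
    by_cases hp : p x = true
    · by_cases hq : q x = true
      · simp [hp, List.find?, hq]
      · simp only [List.filter_cons, if_pos hp, List.find?, hq, Bool.and_false]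
        exact ih
    · simp only [List.filter_cons, hp, List.find?, Bool.false_and]
      exact ih

-- one row: the incremental pass over the usable flights equals B's first-fit over ranked
lemma pv_row_eq (pred : (String × Int) → Bool) (all_flights : List (String × Int)) (target total : Int) :
    ∀ (i d bd : Int) (bo : Option (Int × (String × Int))),
      (pvI_inner target i (total - d) (all_flights.filter pred) (bd, bo)).1
        = pvB_scan (target - total + d) bd i bo
            (PySem.List.sorted
              (all_flights.foldl (fun dd f => if pred f && !(PySem.Dict.contains dd f.2) then dd.insert f.2 f else dd) PySem.Dict.empty).items
              (fun p => p.1) true) := by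
  intro i d bd bo
  set avail := all_flights.filter pred with havail
  set dict := all_flights.foldl (fun dd f => if pred f && !(PySem.Dict.contains dd f.2) then dd.insert f.2 f else dd) PySem.Dict.empty with hdict
  set ranked := PySem.List.sorted dict.items (fun p => p.1) true with hranked
  set bound := target - total + d with hbound
  have hget : ∀ k, dict.get? k = avail.find? (fun f => f.2 == k) := by
    intro k
    rw [hdict, pv_dict_get pred all_flights PySem.Dict.empty k, PySem.Dict.get?_empty,
      Option.none_or, havail, pv_find?_filter]
  have hnd : dict.keys.Nodup := pv_dict_nodup pred all_flights PySem.Dict.empty PySem.Dict.nodup_keys_empty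
  -- every ranked entry (dur, f): f is the first usable flight with duration dur (so f.2 = dur, f ∈ avail)
  have hentry : ∀ p ∈ ranked, avail.find? (fun f => f.2 == p.1) = some p.2 := by
    intro p hp
    have : p ∈ dict.items := (PySem.List.mem_sorted ..).1 hp
    obtain ⟨k, v⟩ := p
    have := PySem.Dict.get?_of_mem_items dict this hnd
    rw [hget] at this; exact this
  have hentry_mem : ∀ p ∈ ranked, p.2 ∈ avail ∧ p.2.2 = p.1 := by
    intro p hp
    have h := hentry p hp
    exact ⟨List.mem_of_find?_eq_some h, by simpa using List.find?_some h⟩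
  -- ranked is strictly descending in duration
  have hpw : ranked.Pairwise (fun a b => b.1 < a.1) := by
    have h1 : ranked.Pairwise (fun a b => b.1 ≤ a.1) := PySem.List.sorted_pairwise_rev ..
    have h2 : (ranked.map (·.1)).Nodup := by
      have hperm : ranked.Perm dict.items := PySem.List.sorted_perm ..
      have : (ranked.map (·.1)).Perm (dict.items.map (·.1)) := hperm.map _
      exact (this.nodup_iff).2 hnd
    have h3 : ranked.Pairwise (fun a b => a.1 ≠ b.1) := by
      rw [List.Nodup, List.pairwise_map] at h2; exact h2
    exact (h1.and h3).imp (fun h => by omega)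
  rw [pv_inner_bf target i (total - d) bound (by omega)]
  rcases hbf : pvBF bound avail with _ | g <;>
    simp only [Option.elim_none, Option.elim_some]
  · rw [pvB_scan_none]
    intro p hp hle
    obtain ⟨hmem, hdur⟩ := hentry_mem p hp
    exact pvBF_none bound avail hbf p.2 hmem (by omega)
  · obtain ⟨hle, hmax, hfind⟩ := pvBF_some bound avail g hbf
    -- (g.2, g) is a ranked entry
    have hg_mem : (g.2, g) ∈ ranked := by
      have hmemav : g ∈ avail := List.mem_of_find?_eq_some hfind
      -- g.2 is a key of the dict
      have : (avail.find? (fun f => f.2 == g.2)).isSome := by rw [hfind]; rfl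
      have hkey : (dict.get? g.2).isSome := by rw [hget]; exact this
      obtain ⟨v, hv⟩ := Option.isSome_iff_exists.1 hkey
      have hvitems : (g.2, v) ∈ dict.items := PySem.Dict.mem_items_of_get?_eq_some dict hv
      have hvr : (g.2, v) ∈ ranked := (PySem.List.mem_sorted ..).2 hvitems
      have : v = g := by
        have := hentry (g.2, v) hvr
        simp only at this
        rw [hfind] at this
        exact (Option.some.injEq .. ▸ this).symm
      exact this ▸ hvr
    rw [pvB_scan_best bound bd i bo ranked g.2 g hpw hg_mem hle]
    · split_ifs <;> rfl
    · intro p hp hple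
      obtain ⟨hmem, hdur⟩ := hentry_mem p hp
      have := hmax p.2 hmem (by omega)
      omega

-- once best_diff has hit 0 the remaining rows change nothing
lemma pv_fold_scan_id (ranked : List (Int × (String × Int))) (target total : Int) :
    ∀ (rows : List (Int × (String × Int))) (bo : Option (Int × (String × Int))),
      rows.foldl (fun st ip => pvB_scan (target - total + ip.2.2) st.1 ip.1 st.2 ranked) (0, bo) = (0, bo) := by
  intro rows
  induction rows with
  | nil => intro bo; rfl
  | cons ip rest ih =>
    intro bo
    simp only [List.foldl_cons, pvB_scan_id]
    exact ih bo

-- the incremental outer loop (with its break) is B's plain fold over the rows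
lemma pv_outer_fold (pred : (String × Int) → Bool) (all_flights : List (String × Int)) (target total : Int) :
    ∀ (rows : List (Int × (String × Int))) (st : Int × Option (Int × (String × Int))),
      pvI_outer (all_flights.filter pred) target total rows st
        = rows.foldl (fun st ip => pvB_scan (target - total + ip.2.2) st.1 ip.1 st.2
            (PySem.List.sorted
              (all_flights.foldl (fun dd f => if pred f && !(PySem.Dict.contains dd f.2) then dd.insert f.2 f else dd) PySem.Dict.empty).items
              (fun p => p.1) true)) st := by
  intro rows
  induction rows with
  | nil => intro st; rfl
  | cons ip rest ih =>
    intro st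
    obtain ⟨i, p⟩ := ip
    obtain ⟨bd, bo⟩ := st
    simp only [pvI_outer, List.foldl_cons]
    rw [pv_row_eq pred all_flights target total i p.2 bd bo]
    rcases hs : pvB_scan (target - total + p.2) bd i bo _ with ⟨bd', bo'⟩
    by_cases h0 : bd' = 0
    · subst h0
      rw [if_pos rfl]
      exact (pv_fold_scan_id _ target total rest bo').symm
    · rw [if_neg h0]
      exact ih (bd', bo')

-- ===== VERDICT (by name: the statement is the Claim_ definition above) =====
theorem optimize_combination_spec : Claim_equal_optimize_combination := by
  intro combo all_flights target _
  unfold Spec_optimize_combination optimize_combination optimize_combination_alt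
  have h := pv_outer_equiv combo
    (all_flights.filter (fun f => !(PySem.Set.contains (PySem.Set.ofList (combo.map (·.1))) f.1)))
    target (PySem.List.enumerate combo 0)
    (by
      intro x hx
      rcases (PySem.List.mem_enumerate_iff _ _ _).1 hx with ⟨k, hkl, hx⟩
      exact ⟨k, hkl, by simpa using hx⟩)
    (target - (combo.map (·.2)).sum) none
  rw [pv_outer_fold (fun f => !(PySem.Set.contains (PySem.Set.ofList (combo.map (·.1))) f.1))
    all_flights target ((combo.map (·.2)).sum)] at h
  simpa [pvB_build] using h
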